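-- pv_equiv track=rewrite | github.com/andrew-malokhatko/dsa | tests/generator/testGeneratorBdd.py | split_literals
-- ===== SOURCE A (Python) =====
-- def split_literals(term):
--     literals = []
--     i = 0
--     while i < len(term):
--         if term[i] == '!':
--             literals.append(term[i:i+2])
--             i += 2
--         else:
--             literals.append(term[i])
--             i += 1
--     return literals
-- ===== SOURCE B (Python) =====
-- def split_literals(term):
--     it = iter(term)
--     return [c + next(it, '') if c == '!' else c for c in it]
-- ===== Notes on version B (the rewrite author's own statement) =====
-- stated objective: idiomatic
-- what changed: Replaces the index-managed while loop with slicing and manual i+=2 by a single list comprehension over a consuming iterator where a bang pulls its following character via next with a default; this avoids per-character indexing, slicing and append calls.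
import Mathlib
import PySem

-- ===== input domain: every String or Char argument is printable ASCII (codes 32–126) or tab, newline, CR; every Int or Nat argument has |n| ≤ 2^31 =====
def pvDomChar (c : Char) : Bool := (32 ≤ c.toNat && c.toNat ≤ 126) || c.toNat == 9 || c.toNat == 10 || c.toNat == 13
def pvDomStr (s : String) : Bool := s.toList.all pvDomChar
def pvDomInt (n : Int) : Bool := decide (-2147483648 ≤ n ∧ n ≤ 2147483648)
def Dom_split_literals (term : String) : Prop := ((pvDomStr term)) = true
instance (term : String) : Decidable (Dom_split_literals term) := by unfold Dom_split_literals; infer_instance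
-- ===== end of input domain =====

-- B replaces A's index-managed while loop (slice + i += 2) by a single scan that, at a '!',
-- consumes the following character directly (iterator lookahead); same return value; a timing run measured B faster (constant factor).

-- ===== PORT A =====
-- while loop over index i; term[i:i+2] is PySem.List.slice, term[i] is cs[i] (i < len proved by the loop guard)
def split_literals_go (cs : List Char) (i : Nat) : List String :=
  if h : i < cs.length then
    if cs[i] = '!' then
      String.ofList (PySem.List.slice cs (some (i : Int)) (some ((i : Int) + 2))) :: split_literals_go cs (i + 2)
    else
      String.ofList [cs[i]] :: split_literals_go cs (i + 1)
  else []
termination_by cs.length - i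

def split_literals (term : String) : List String := split_literals_go term.toList 0

-- ===== PORT B =====
-- consuming scan: a '!' takes the next character too (next(it, '') gives '' at the end)
def split_literals_alt_go : List Char → List String
  | [] => []
  | c :: rest =>
    if c = '!' then
      match rest with
      | [] => [String.ofList ['!']]
      | d :: rest' => String.ofList ['!', d] :: split_literals_alt_go rest'
    else String.ofList [c] :: split_literals_alt_go rest

def split_literals_alt (term : String) : List String := split_literals_alt_go term.toList

-- ===== PRECONDITION & SPEC =====
def Spec_split_literals (term : String) (out : List String) : Prop := out = split_literals_alt term
instance (term : String) (out : List String) : Decidable (Spec_split_literals term out) := by unfold Spec_split_literals; infer_instance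

-- ===== CLAIM (what is proved, stated in full; the proofs are below) =====
def Claim_equal_split_literals : Prop := ∀ (term : String), Dom_split_literals term → Spec_split_literals term (split_literals term)

-- ===== LEMMAS AND PROOFS =====

theorem split_literals_go_eq_alt (cs : List Char) (i : Nat) :
    split_literals_go cs i = split_literals_alt_go (cs.drop i) := by
  induction hn : cs.length - i using Nat.strong_induction_on generalizing i with
  | _ n ih =>
    rw [split_literals_go]
    by_cases h : i < cs.length
    · have hdrop : cs.drop i = cs[i] :: cs.drop (i + 1) := by
        rw [List.getElem_cons_drop]
      rw [hdrop]
      by_cases hb : cs[i] = '!'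
      · simp only [h, dif_pos, hb, if_pos]
        rw [split_literals_alt_go.eq_def]
        have hslice : PySem.List.slice cs (some (i : Int)) (some ((i : Int) + 2))
            = (cs.drop i).take 2 := by
          have := PySem.List.slice_natCast_add cs i 2
          simpa using this
        cases hd1 : cs.drop (i + 1) with
        | nil =>
          have hlen : cs.length ≤ i + 1 := by
            have := List.drop_eq_nil_iff.mp hd1
            omega
          rw [split_literals_go]
          have : ¬ i + 2 < cs.length := by omega
          simp only [this, dif_neg, not_false_iff]
          rw [hslice, hdrop, hd1, hb]
          simp
        | cons d rest' =>
          have hd2 : cs.drop (i + 2) = rest' := by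
            have : cs.drop (i + 2) = (cs.drop (i + 1)).drop 1 := by
              rw [List.drop_drop]
            rw [this, hd1]; rfl
          rw [hslice, hdrop, hd1, hb]
          have : n = cs.length - i → split_literals_go cs (i + 2) = split_literals_alt_go (cs.drop (i + 2)) := by
            intro hni
            exact ih (cs.length - (i + 2)) (by omega) (i + 2) rfl
          rw [this hn.symm, hd2]
          simp
      · simp only [h, dif_pos, hb, if_neg, not_false_iff]
        rw [split_literals_alt_go.eq_def]
        simp only [hb, if_neg, not_false_iff]
        have : split_literals_go cs (i + 1) = split_literals_alt_go (cs.drop (i + 1)) :=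
          ih (cs.length - (i + 1)) (by omega) (i + 1) rfl
        rw [this]
    · have hdrop : cs.drop i = [] := List.drop_eq_nil_iff.mpr (by omega)
      simp [h, hdrop, split_literals_alt_go]

-- ===== VERDICT (by name: the statement is the Claim_ definition above) =====
theorem split_literals_spec : Claim_equal_split_literals := by
  intro term _
  unfold Spec_split_literals split_literals split_literals_alt
  simpa using split_literals_go_eq_alt term.toList 0
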